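-- pv_equiv track=rewrite | github.com/feldman4/postdoc | flycodes/design.py | rolling_window_sizes
-- ===== SOURCE A (Python) =====
-- def rolling_window_sizes(values, window_size):
--     sizes = []
--     for i in range(len(values)):
--         right_edge = i
--         while values[right_edge] < (values[i] + window_size):
--             right_edge += 1
--             if right_edge >= len(values):
--                 break
--         sizes += [right_edge - i]
--     return sizes
-- ===== SOURCE B (Python) =====
-- def rolling_window_sizes(values, window_size):
--     # Right-to-left pass memoizing each window end, so later positions can be
--     # skipped over in jumps instead of re-scanned element by element.
--     n = len(values)
--     ends = [0] * n
--     for i in range(n - 1, -1, -1):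
--         v = values[i]
--         t = v + window_size
--         if v >= t:
--             ends[i] = i
--         else:
--             j = i + 1
--             while j < n and values[j] < t:
--                 if values[j] <= v:
--                     j = ends[j]
--                 else:
--                     j += 1
--             ends[i] = j
--     return [e - i for i, e in enumerate(ends)]
-- ===== Notes on version B (the rewrite author's own statement) =====
-- stated objective: faster
-- what changed: Replaces A's fresh left-to-right scan of the window for every position with a single right-to-left pass that memoizes each position's window end in a table and follows those memoized jumps to skip already-classified stretches instead of re-scanning them.
import Mathlib
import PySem

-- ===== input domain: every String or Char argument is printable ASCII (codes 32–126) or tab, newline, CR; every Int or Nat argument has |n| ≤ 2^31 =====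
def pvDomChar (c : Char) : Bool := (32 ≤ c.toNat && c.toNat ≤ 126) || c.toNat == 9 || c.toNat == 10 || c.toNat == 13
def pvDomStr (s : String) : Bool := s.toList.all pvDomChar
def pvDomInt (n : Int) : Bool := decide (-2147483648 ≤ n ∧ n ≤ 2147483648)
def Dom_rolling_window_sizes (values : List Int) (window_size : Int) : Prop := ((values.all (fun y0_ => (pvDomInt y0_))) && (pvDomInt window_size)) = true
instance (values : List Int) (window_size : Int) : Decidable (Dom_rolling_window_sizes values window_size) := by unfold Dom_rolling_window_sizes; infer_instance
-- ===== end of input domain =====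

-- B replaces A's per-position rescan by a right-to-left pass memoizing window ends (jump table); return value proved identical on all inputs.

-- ===== PORT A =====
-- the inner `while values[right_edge] < t: right_edge += 1; if right_edge >= len(values): break`
-- (indices are always in range when read, so getD is exact)
def rwsLoop (values : List Int) (t : Int) (re : Nat) : Nat :=
  if _h : re < values.length then
    if values.getD re 0 < t then
      if re + 1 ≥ values.length then re + 1
      else rwsLoop values t (re + 1)
    else re
  else re
termination_by values.length - re

def rolling_window_sizes (values : List Int) (window_size : Int) : List Int :=
  (List.range values.length).foldl
    (fun sizes i =>
      sizes ++ [((rwsLoop values (values.getD i 0 + window_size) i : Int) - (i : Int))]) []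

-- ===== PORT B =====
-- inner `while j < n and values[j] < t: j = ends[j] if values[j] <= v else j + 1`;
-- all indices and table entries are nonnegative in Python, so they are carried as Nat;
-- fuel (n+1) only makes the recursion total — it is proved sufficient on every real run.
def rwsJump (values : List Int) (v t : Int) (ends : List Nat) (j : Nat) (fuel : Nat) : Nat :=
  match fuel with
  | 0 => j
  | f + 1 =>
    if j < values.length then
      if values.getD j 0 < t then
        if values.getD j 0 ≤ v then rwsJump values v t ends (ends.getD j 0) f
        else rwsJump values v t ends (j + 1) f
      else j
    else j

-- one iteration of `for i in range(n-1, -1, -1)`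
def rwsStep (values : List Int) (window_size : Int) (ends : List Nat) (i : Nat) : List Nat :=
  let v := values.getD i 0
  let t := v + window_size
  if v ≥ t then ends.set i i
  else ends.set i (rwsJump values v t ends (i + 1) (values.length + 1))

def rolling_window_sizes_alt (values : List Int) (window_size : Int) : List Int :=
  let n := values.length
  let ends := ((List.range n).reverse).foldl (rwsStep values window_size) (List.replicate n 0)
  ends.zipIdx.map (fun p => (p.1 : Int) - (p.2 : Int))

-- ===== PRECONDITION & SPEC =====
def Spec_rolling_window_sizes (values : List Int) (window_size : Int) (out : List Int) : Prop := out = rolling_window_sizes_alt values window_size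
instance (values : List Int) (window_size : Int) (out : List Int) : Decidable (Spec_rolling_window_sizes values window_size out) := by unfold Spec_rolling_window_sizes; infer_instance

-- ===== CLAIM (what is proved, stated in full; the proofs are below) =====
def Claim_equal_rolling_window_sizes : Prop := ∀ (values : List Int) (window_size : Int), Dom_rolling_window_sizes values window_size → Spec_rolling_window_sizes values window_size (rolling_window_sizes values window_size)

-- ===== LEMMAS AND PROOFS =====

-- the common specification: first index k ≥ j with values[k] ≥ t, else n
def fh (values : List Int) (t : Int) (j : Nat) : Nat :=
  if _h : j < values.length then
    if values.getD j 0 ≥ t then j else fh values t (j + 1)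
  else j
termination_by values.length - j

theorem fh_ge (values : List Int) (t : Int) (j : Nat) : j ≤ fh values t j := by
  rw [fh]
  split
  · split
    · exact le_refl j
    · have := fh_ge values t (j + 1); omega
  · exact le_refl j
termination_by values.length - j

theorem fh_le (values : List Int) (t : Int) (j : Nat) (h : j ≤ values.length) :
    fh values t j ≤ values.length := by
  rw [fh]
  split
  · split
    · omega
    · exact fh_le values t (j + 1) (by omega)
  · omega
termination_by values.length - j

theorem fh_lt_all (values : List Int) (t : Int) (j k : Nat)
    (h1 : j ≤ k) (h2 : k < fh values t j) : values.getD k 0 < t := by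
  rw [fh] at h2
  split at h2
  · split at h2
    · omega
    · rcases Nat.eq_or_lt_of_le h1 with h | h
      · subst h; omega
      · exact fh_lt_all values t (j + 1) k h h2
  · omega
termination_by values.length - j

theorem fh_skip (values : List Int) (t : Int) (j m : Nat)
    (hjm : j ≤ m) (hm : m ≤ values.length)
    (hall : ∀ k, j ≤ k → k < m → values.getD k 0 < t) :
    fh values t j = fh values t m := by
  rcases Nat.eq_or_lt_of_le hjm with h | h
  · subst h; rfl
  · have hj : values.getD j 0 < t := hall j (le_refl j) h
    rw [fh]
    split
    · split
      · omega
      · exact fh_skip values t (j + 1) m h hm (fun k hk1 hk2 => hall k (by omega) hk2)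
    · omega
termination_by m - j

theorem rwsLoop_eq_fh (values : List Int) (t : Int) (re : Nat) :
    rwsLoop values t re = fh values t re := by
  rw [rwsLoop, fh]
  by_cases h1 : re < values.length
  · rw [dif_pos h1, dif_pos h1]
    by_cases h2 : values.getD re 0 < t
    · have h2' : ¬ (values.getD re 0 ≥ t) := by omega
      rw [if_pos h2, if_neg h2']
      by_cases h3 : re + 1 ≥ values.length
      · rw [if_pos h3, fh, dif_neg (by omega)]
      · rw [if_neg h3]; exact rwsLoop_eq_fh values t (re + 1)
    · have h2' : values.getD re 0 ≥ t := by omega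
      rw [if_neg h2, if_pos h2']
  · rw [dif_neg h1, dif_neg h1]
termination_by values.length - re

theorem rwsJump_eq_fh (values : List Int) (v w : Int) (ends : List Nat) (i0 : Nat)
    (hw : 0 < w)
    (hends : ∀ k, i0 < k → k < values.length → values.getD k 0 ≤ v →
      ends.getD k 0 = fh values (values.getD k 0 + w) k) :
    ∀ fuel j, i0 < j → values.length - j < fuel →
      rwsJump values v (v + w) ends j fuel = fh values (v + w) j := by
  intro fuel
  induction fuel with
  | zero => intro j hj hf; omega
  | succ f ih =>
    intro j hj hf
    rw [rwsJump]
    by_cases h1 : j < values.length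
    · rw [if_pos h1]
      by_cases h2 : values.getD j 0 < v + w
      · rw [if_pos h2]
        by_cases h3 : values.getD j 0 ≤ v
        · rw [if_pos h3]
          have hm := hends j hj h1 h3
          have hm1 : j + 1 ≤ ends.getD j 0 := by
            rw [hm, fh, dif_pos h1,
              if_neg (show ¬ values.getD j 0 ≥ values.getD j 0 + w by omega)]
            exact fh_ge values _ (j + 1)
          have hm2 : ends.getD j 0 ≤ values.length := by
            rw [hm]; exact fh_le values _ j (le_of_lt h1)
          have hall : ∀ k, j ≤ k → k < ends.getD j 0 → values.getD k 0 < v + w := by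
            intro k hk1 hk2
            rw [hm] at hk2
            have := fh_lt_all values (values.getD j 0 + w) j k hk1 hk2
            omega
          rw [ih (ends.getD j 0) (by omega) (by omega)]
          exact (fh_skip values (v + w) j (ends.getD j 0) (by omega) hm2 hall).symm
        · rw [if_neg h3, ih (j + 1) (by omega) (by omega)]
          conv_rhs => rw [fh]
          rw [dif_pos h1, if_neg (show ¬ values.getD j 0 ≥ v + w by omega)]
      · rw [if_neg h2, fh, dif_pos h1, if_pos (by omega)]
    · rw [if_neg h1, fh, dif_neg h1]

-- generic: foldl appending singletons is a map
theorem foldl_append_map (l : List Nat) (f : Nat → Int) (acc : List Int) :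
    l.foldl (fun acc i => acc ++ [f i]) acc = acc ++ l.map f := by
  induction l generalizing acc with
  | nil => simp
  | cons x xs ih => simp [List.foldl_cons, ih]

theorem rwsStep_inv (values : List Int) (w : Int) (ends : List Nat) (i : Nat)
    (hlen : ends.length = values.length) (hi : i < values.length)
    (hends : ∀ k, i < k → k < values.length →
      ends.getD k 0 = fh values (values.getD k 0 + w) k) :
    (rwsStep values w ends i).length = values.length ∧
    ∀ k, i ≤ k → k < values.length →
      (rwsStep values w ends i).getD k 0 = fh values (values.getD k 0 + w) k := by
  have hset : ∀ a : Nat, ∀ k, k < values.length →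
      (ends.set i a).getD k 0 = if k = i then a else ends.getD k 0 := by
    intro a k hk
    have hk' : k < ends.length := by omega
    rw [List.getD_eq_getElem _ _ (by simpa [List.length_set] using hk')]
    by_cases he : k = i
    · subst he; rw [if_pos rfl, List.getElem_set_self]
    · rw [if_neg he, List.getElem_set_ne (by omega), ← List.getD_eq_getElem _ _ hk']
  rw [rwsStep]
  by_cases hv : values.getD i 0 ≥ values.getD i 0 + w
  · rw [if_pos hv]
    refine ⟨by simp [List.length_set, hlen], ?_⟩
    intro k hk1 hk2
    rw [hset i k hk2]
    by_cases he : k = i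
    · subst he; rw [if_pos rfl, fh, dif_pos hk2, if_pos hv]
    · rw [if_neg he]; exact hends k (by omega) hk2
  · rw [if_neg hv]
    refine ⟨by simp [List.length_set, hlen], ?_⟩
    intro k hk1 hk2
    have hw : 0 < w := by omega
    have hjump := rwsJump_eq_fh values (values.getD i 0) w ends i hw
      (fun k' hk1' hk2' hle => hends k' hk1' hk2') (values.length + 1) (i + 1)
      (by omega) (by omega)
    rw [hset _ k hk2]
    by_cases he : k = i
    · subst he
      rw [if_pos rfl, hjump]
      conv_rhs => rw [fh]
      rw [dif_pos hk2, if_neg hv]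
    · rw [if_neg he]; exact hends k (by omega) hk2

theorem fold_inv (values : List Int) (w : Int) :
    ∀ m, m ≤ values.length → ∀ ends : List Nat, ends.length = values.length →
    (∀ k, m ≤ k → k < values.length →
      ends.getD k 0 = fh values (values.getD k 0 + w) k) →
    (((List.range m).reverse).foldl (rwsStep values w) ends).length = values.length ∧
    ∀ k, k < values.length →
      (((List.range m).reverse).foldl (rwsStep values w) ends).getD k 0
        = fh values (values.getD k 0 + w) k := by
  intro m
  induction m with
  | zero =>
    intro _ ends hlen hends
    exact ⟨by simpa using hlen, fun k hk => by simpa using hends k (Nat.zero_le k) hk⟩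
  | succ m ih =>
    intro hm ends hlen hends
    have hstep := rwsStep_inv values w ends m hlen (by omega)
      (fun k hk1 hk2 => hends k (by omega) hk2)
    have : ((List.range (m + 1)).reverse) = m :: (List.range m).reverse := by
      rw [List.range_succ, List.reverse_append]; rfl
    rw [this, List.foldl_cons]
    exact ih (by omega) (rwsStep values w ends m) hstep.1
      (fun k hk1 hk2 => hstep.2 k hk1 hk2)

-- ===== VERDICT (by name: the statement is the Claim_ definition above) =====
theorem rolling_window_sizes_spec : Claim_equal_rolling_window_sizes := by
  intro values w _
  unfold Spec_rolling_window_sizes rolling_window_sizes rolling_window_sizes_alt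
  have hfold := fold_inv values w values.length (le_refl _)
    (List.replicate values.length 0) (by simp)
    (fun k hk1 hk2 => absurd hk2 (by omega))
  rw [foldl_append_map]
  apply List.ext_getElem
  · simpa using hfold.1.symm
  · intro k h1 h2
    have hk : k < values.length := by simpa using h1
    simp only [List.nil_append, List.getElem_map, List.getElem_range, List.getElem_zipIdx]
    rw [rwsLoop_eq_fh]
    have hlen : k < (((List.range values.length).reverse).foldl (rwsStep values w)
        (List.replicate values.length 0)).length := by rw [hfold.1]; exact hk
    rw [← List.getD_eq_getElem _ 0 hlen, hfold.2 k hk]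
    simp
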